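-- pv_equiv track=rewrite | github.com/wpgrant/aoc | 2023/7b.py | improveHandWithJokers
-- ===== SOURCE A (Python) =====
-- def improveHandWithJokers(hand, rank):
--   newRank = rank
--   # First, get number of jokers
--   cntJokers = 0
--   for char in hand:
--     if char == "J": cntJokers += 1
--
--   for i in range(0, cntJokers):
--     # In Part 2, Js can improve hands.
--     # The path is: 7->6, 6->4, 5->3, 4->2, 3->2, 2->1
--     match newRank:
--       case 7:
--         newRank = 6
--       case 6:
--         newRank = 4
--       case 5:
--         newRank = 3
--       case 4 | 3:
--         newRank = 2
--       case 2:
--         newRank = 1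
--       case _:
--         # Already maxed
--         break
--
--   return newRank
-- ===== SOURCE B (Python) =====
-- def improveHandWithJokers(hand, rank):
--   # Table of the full descent path from each rank; each joker advances one step,
--   # clamped at the end of the path.  One lookup instead of a per-joker loop.
--   paths = {
--     7: [7, 6, 4, 2, 1],
--     6: [6, 4, 2, 1],
--     5: [5, 3, 2, 1],
--     4: [4, 2, 1],
--     3: [3, 2, 1],
--     2: [2, 1],
--   }
--   path = paths.get(rank, [rank])
--   return path[min(hand.count("J"), len(path) - 1)]
-- ===== Notes on version B (the rewrite author's own statement) =====
-- stated objective: simpler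
-- what changed: Replaces the per-joker state-machine loop with a precomputed descent-path table indexed by the joker count clamped to the path length.
import Mathlib
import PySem

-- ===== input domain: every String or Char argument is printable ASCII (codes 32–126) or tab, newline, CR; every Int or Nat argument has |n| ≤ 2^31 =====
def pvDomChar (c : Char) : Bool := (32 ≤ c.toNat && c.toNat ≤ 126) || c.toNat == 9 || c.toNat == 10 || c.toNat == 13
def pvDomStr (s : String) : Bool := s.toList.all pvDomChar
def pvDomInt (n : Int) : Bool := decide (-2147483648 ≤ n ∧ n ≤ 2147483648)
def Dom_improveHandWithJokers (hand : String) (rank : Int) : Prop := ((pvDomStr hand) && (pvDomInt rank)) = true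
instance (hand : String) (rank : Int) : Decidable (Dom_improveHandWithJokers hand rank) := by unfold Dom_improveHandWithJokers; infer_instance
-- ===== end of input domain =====

-- B replaces A's per-joker state-machine loop with a precomputed descent-path table
-- indexed by the joker count clamped to the path length (objective: simpler).

-- ===== PORT A =====
-- the 'for i in range(0, cntJokers)' loop; the final 'else' branch is the 'break'
def improveHandWithJokersLoop : Nat → Int → Int
  | 0, newRank => newRank
  | Nat.succ n, newRank =>
    if newRank = 7 then improveHandWithJokersLoop n 6
    else if newRank = 6 then improveHandWithJokersLoop n 4
    else if newRank = 5 then improveHandWithJokersLoop n 3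
    else if newRank = 4 ∨ newRank = 3 then improveHandWithJokersLoop n 2
    else if newRank = 2 then improveHandWithJokersLoop n 1
    else newRank

def improveHandWithJokers (hand : String) (rank : Int) : Int :=
  -- for char in hand: if char == "J": cntJokers += 1
  let cntJokers : Int := hand.toList.foldl (fun n c => if c == 'J' then n + 1 else n) 0
  -- range(0, cntJokers) iterates cntJokers.toNat times (empty when cntJokers ≤ 0)
  improveHandWithJokersLoop cntJokers.toNat rank

-- ===== PORT B =====
def improveHandWithJokers_alt (hand : String) (rank : Int) : Int :=
  let paths : PySem.Dict Int (List Int) :=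
    PySem.Dict.ofList [(7, [7, 6, 4, 2, 1]), (6, [6, 4, 2, 1]), (5, [5, 3, 2, 1]),
                       (4, [4, 2, 1]), (3, [3, 2, 1]), (2, [2, 1])]
  let path := paths.getD rank [rank]
  -- path[min(hand.count("J"), len(path) - 1)]: the index is always in range, so getD is exact
  path.getD (min (PySem.Str.count hand "J") (path.length - 1)) 0

-- ===== PRECONDITION & SPEC =====
def Spec_improveHandWithJokers (hand : String) (rank : Int) (out : Int) : Prop := out = improveHandWithJokers_alt hand rank
instance (hand : String) (rank : Int) (out : Int) : Decidable (Spec_improveHandWithJokers hand rank out) := by unfold Spec_improveHandWithJokers; infer_instance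

-- ===== CLAIM (what is proved, stated in full; the proofs are below) =====
def Claim_equal_improveHandWithJokers : Prop := ∀ (hand : String) (rank : Int), Dom_improveHandWithJokers hand rank → Spec_improveHandWithJokers hand rank (improveHandWithJokers hand rank)

-- ===== LEMMAS AND PROOFS =====

-- Python's s.count(c) for a single character equals List.count on the characters
theorem chars_count_go_single (c : Char) (l : List Char) :
    ∀ (fuel acc : Nat), l.length ≤ fuel →
      PySem.Chars.count.go [c] fuel l acc = acc + l.count c := by
  induction l with
  | nil =>
    intro fuel acc _
    cases fuel <;> simp [PySem.Chars.count.go]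
  | cons h t ih =>
    intro fuel acc hf
    cases fuel with
    | zero => simp at hf
    | succ n =>
      have ht : t.length ≤ n := by simpa using hf
      by_cases hc : h = c
      · subst hc
        simp [PySem.Chars.count.go, List.isPrefixOf, ih n (acc + 1) ht]
        omega
      · simp [PySem.Chars.count.go, List.isPrefixOf, hc, Ne.symm hc, ih n acc ht, beq_iff_eq]

theorem str_count_single (hand : String) :
    PySem.Str.count hand "J" = hand.toList.count 'J' := by
  have h := chars_count_go_single 'J' hand.toList hand.toList.length 0 le_rfl
  have hJ : ("J" : String).toList = ['J'] := rfl
  rw [PySem.Str.count_eq, hJ]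
  simpa [PySem.Chars.count] using h

-- the state machine never leaves a rank outside {7,6,5,4,3,2}
theorem loop_stuck (n : Nat) (r : Int)
    (h : r ≠ 7 ∧ r ≠ 6 ∧ r ≠ 5 ∧ r ≠ 4 ∧ r ≠ 3 ∧ r ≠ 2) :
    improveHandWithJokersLoop n r = r := by
  obtain ⟨h7, h6, h5, h4, h3, h2⟩ := h
  cases n with
  | zero => rfl
  | succ m => simp [improveHandWithJokersLoop, h7, h6, h5, h4, h3, h2]

-- A's loop from each live start equals the table lookup clamped by the joker count
theorem loop_path7 (n : Nat) :
    improveHandWithJokersLoop n 7 = [(7:Int), 6, 4, 2, 1].getD (min n 4) 0 := by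
  match n with
  | 0 => rfl
  | 1 => rfl
  | 2 => rfl
  | 3 => rfl
  | (m + 4) =>
    have h1 : improveHandWithJokersLoop (m + 4) 7 = improveHandWithJokersLoop m 1 := by
      simp [improveHandWithJokersLoop]
    rw [h1, loop_stuck m 1 (by norm_num)]
    simp

theorem loop_path6 (n : Nat) :
    improveHandWithJokersLoop n 6 = [(6:Int), 4, 2, 1].getD (min n 3) 0 := by
  match n with
  | 0 => rfl
  | 1 => rfl
  | 2 => rfl
  | (m + 3) =>
    have h1 : improveHandWithJokersLoop (m + 3) 6 = improveHandWithJokersLoop m 1 := by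
      simp [improveHandWithJokersLoop]
    rw [h1, loop_stuck m 1 (by norm_num)]
    simp

theorem loop_path5 (n : Nat) :
    improveHandWithJokersLoop n 5 = [(5:Int), 3, 2, 1].getD (min n 3) 0 := by
  match n with
  | 0 => rfl
  | 1 => rfl
  | 2 => rfl
  | (m + 3) =>
    have h1 : improveHandWithJokersLoop (m + 3) 5 = improveHandWithJokersLoop m 1 := by
      simp [improveHandWithJokersLoop]
    rw [h1, loop_stuck m 1 (by norm_num)]
    simp

theorem loop_path4 (n : Nat) :
    improveHandWithJokersLoop n 4 = [(4:Int), 2, 1].getD (min n 2) 0 := by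
  match n with
  | 0 => rfl
  | 1 => rfl
  | (m + 2) =>
    have h1 : improveHandWithJokersLoop (m + 2) 4 = improveHandWithJokersLoop m 1 := by
      simp [improveHandWithJokersLoop]
    rw [h1, loop_stuck m 1 (by norm_num)]
    simp

theorem loop_path3 (n : Nat) :
    improveHandWithJokersLoop n 3 = [(3:Int), 2, 1].getD (min n 2) 0 := by
  match n with
  | 0 => rfl
  | 1 => rfl
  | (m + 2) =>
    have h1 : improveHandWithJokersLoop (m + 2) 3 = improveHandWithJokersLoop m 1 := by
      simp [improveHandWithJokersLoop]
    rw [h1, loop_stuck m 1 (by norm_num)]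
    simp

theorem loop_path2 (n : Nat) :
    improveHandWithJokersLoop n 2 = [(2:Int), 1].getD (min n 1) 0 := by
  match n with
  | 0 => rfl
  | (m + 1) =>
    have h1 : improveHandWithJokersLoop (m + 1) 2 = improveHandWithJokersLoop m 1 := by
      simp [improveHandWithJokersLoop]
    rw [h1, loop_stuck m 1 (by norm_num)]
    simp

-- ===== VERDICT (by name: the statement is the Claim_ definition above) =====
theorem improveHandWithJokers_spec : Claim_equal_improveHandWithJokers := by
  intro hand rank _
  have hcnt : (hand.toList.foldl (fun n c => if c == 'J' then n + 1 else n) (0 : Int)).toNat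
      = hand.toList.count 'J' := by
    rw [PySem.List.foldl_beq_add_one]
    simp
  unfold Spec_improveHandWithJokers
  simp only [improveHandWithJokers, improveHandWithJokers_alt, str_count_single, hcnt]
  set n := hand.toList.count 'J' with hn
  by_cases h7 : rank = 7
  · subst h7
    have hd : (PySem.Dict.ofList [((7:Int), [(7:Int), 6, 4, 2, 1]), (6, [6, 4, 2, 1]), (5, [5, 3, 2, 1]), (4, [4, 2, 1]), (3, [3, 2, 1]), (2, [2, 1])]).getD 7 [(7:Int)] = [(7:Int), 6, 4, 2, 1] := by decide
    simpa [hd] using loop_path7 n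
  by_cases h6 : rank = 6
  · subst h6
    have hd : (PySem.Dict.ofList [((7:Int), [(7:Int), 6, 4, 2, 1]), (6, [6, 4, 2, 1]), (5, [5, 3, 2, 1]), (4, [4, 2, 1]), (3, [3, 2, 1]), (2, [2, 1])]).getD 6 [(6:Int)] = [(6:Int), 4, 2, 1] := by decide
    simpa [hd] using loop_path6 n
  by_cases h5 : rank = 5
  · subst h5
    have hd : (PySem.Dict.ofList [((7:Int), [(7:Int), 6, 4, 2, 1]), (6, [6, 4, 2, 1]), (5, [5, 3, 2, 1]), (4, [4, 2, 1]), (3, [3, 2, 1]), (2, [2, 1])]).getD 5 [(5:Int)] = [(5:Int), 3, 2, 1] := by decide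
    simpa [hd] using loop_path5 n
  by_cases h4 : rank = 4
  · subst h4
    have hd : (PySem.Dict.ofList [((7:Int), [(7:Int), 6, 4, 2, 1]), (6, [6, 4, 2, 1]), (5, [5, 3, 2, 1]), (4, [4, 2, 1]), (3, [3, 2, 1]), (2, [2, 1])]).getD 4 [(4:Int)] = [(4:Int), 2, 1] := by decide
    simpa [hd] using loop_path4 n
  by_cases h3 : rank = 3
  · subst h3
    have hd : (PySem.Dict.ofList [((7:Int), [(7:Int), 6, 4, 2, 1]), (6, [6, 4, 2, 1]), (5, [5, 3, 2, 1]), (4, [4, 2, 1]), (3, [3, 2, 1]), (2, [2, 1])]).getD 3 [(3:Int)] = [(3:Int), 2, 1] := by decide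
    simpa [hd] using loop_path3 n
  by_cases h2 : rank = 2
  · subst h2
    have hd : (PySem.Dict.ofList [((7:Int), [(7:Int), 6, 4, 2, 1]), (6, [6, 4, 2, 1]), (5, [5, 3, 2, 1]), (4, [4, 2, 1]), (3, [3, 2, 1]), (2, [2, 1])]).getD 2 [(2:Int)] = [(2:Int), 1] := by decide
    simpa [hd] using loop_path2 n
  · rw [loop_stuck n rank ⟨h7, h6, h5, h4, h3, h2⟩]
    have hmk : (PySem.Dict.ofList [((7:Int), [(7:Int), 6, 4, 2, 1]), (6, [6, 4, 2, 1]), (5, [5, 3, 2, 1]), (4, [4, 2, 1]), (3, [3, 2, 1]), (2, [2, 1])])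
        = PySem.Dict.mk [((7:Int), [(7:Int), 6, 4, 2, 1]), (6, [6, 4, 2, 1]), (5, [5, 3, 2, 1]), (4, [4, 2, 1]), (3, [3, 2, 1]), (2, [2, 1])] := by decide
    simp [hmk, PySem.Dict.getD, PySem.Dict.get?, beq_iff_eq,
          Ne.symm h7, Ne.symm h6, Ne.symm h5, Ne.symm h4, Ne.symm h3, Ne.symm h2]
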